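-- pv_equiv track=rewrite | github.com/javathought/learnPy | src/main/coderbyte/kaprekars_constant.py | KaprekarsConstant_acc
-- ===== SOURCE A (Python) =====
-- def KaprekarsConstant_acc(num, acc):
--     # code goes here
--
--     if num == 6174:
--         return acc
--
--     chiffres = (['0' for _ in range(4)] + sorted(str(num)))[-4:]
--
--     b = int(''.join(chiffres))
--     a = int(''.join(reversed(chiffres)))
--
--     n = a - b
--
--     return KaprekarsConstant_acc(n, acc + 1)
-- ===== SOURCE B (Python) =====
-- def KaprekarsConstant_acc(num, acc):
--     # Iterative, string-free reimplementation: extract digits arithmetically,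
--     # sort them numerically, and build the ascending/descending values by folds.
--     n, count = num, acc
--     while n != 6174:
--         ds = []
--         m = n if n >= 0 else -n
--         while m > 0:
--             ds.append(m % 10)
--             m //= 10
--         ds.sort()
--         if len(ds) >= 4:
--             top4 = ds[-4:]
--         else:
--             top4 = [0] * (4 - len(ds)) + ds
--         asc = 0
--         for d in top4:
--             asc = asc * 10 + d
--         desc = 0
--         for d in reversed(top4):
--             desc = desc * 10 + d
--         n = desc - asc
--         count += 1
--     return count
-- ===== Notes on version B (the rewrite author's own statement) =====
-- stated objective: alternative
-- what changed: Replaces A's string-based tail recursion (str/sorted/join/int round-trip per step) by an explicit while-loop that extracts the digits of |n| arithmetically with % and //, sorts them numerically, and rebuilds the ascending/descending numbers with fold-style accumulators.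
import Mathlib
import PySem

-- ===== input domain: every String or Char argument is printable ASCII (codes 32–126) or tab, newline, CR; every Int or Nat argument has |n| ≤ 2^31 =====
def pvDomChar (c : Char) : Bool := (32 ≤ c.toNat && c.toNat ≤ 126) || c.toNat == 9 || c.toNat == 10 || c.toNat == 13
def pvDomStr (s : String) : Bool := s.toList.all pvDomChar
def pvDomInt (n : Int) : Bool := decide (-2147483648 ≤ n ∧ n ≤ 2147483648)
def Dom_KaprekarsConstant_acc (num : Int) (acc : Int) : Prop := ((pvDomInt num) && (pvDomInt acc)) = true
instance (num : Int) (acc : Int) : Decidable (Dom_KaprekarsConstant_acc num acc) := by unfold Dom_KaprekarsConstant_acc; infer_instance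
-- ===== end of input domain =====

-- B is an iterative, string-free reimplementation (arithmetic digit extraction of |n| + numeric
-- sort + fold-built values); equal to A wherever A returns (Pre_); same asymptotic cost, no speed claim.

-- ===== PORT A =====
-- one recursive step of A's body after the 6174 test
def pvStepA (num : Int) : Int :=
  -- chiffres = (['0' for _ in range(4)] + sorted(str(num)))[-4:]
  let chiffres := PySem.List.slice
    ((PySem.List.pyRange 0 4 1).map (fun _ => '0') ++
      PySem.List.sorted (PySem.Int.toChars num) (fun c => c) false) (some (-4)) none
  -- b = int(''.join(chiffres)); a = int(''.join(reversed(chiffres)))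
  -- (.getD 0 is a totality guard: int() never raises here on inputs admitted by Pre_)
  let b := (PySem.Int.ofChars? chiffres).getD 0
  let a := (PySem.Int.ofChars? chiffres.reverse).getD 0
  a - b

-- A's tail recursion; fuel makes it total (Python recurses forever / RecursionError outside Pre_;
-- inside Pre_ at most 8 steps are taken, so fuel 100 is never exhausted there)
def pvGoA : Nat → Int → Int → Int
  | 0, _, acc => acc
  | f + 1, num, acc => if num = 6174 then acc else pvGoA f (pvStepA num) (acc + 1)

def KaprekarsConstant_acc (num : Int) (acc : Int) : Int := pvGoA 100 num acc

-- ===== PORT B =====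
-- ds = []; m = n if n >= 0 else -n; while m > 0: ds.append(m % 10); m //= 10
-- (recursion on m.toNat: the argument is always ≥ 0 here, where the Python loop terminates)
def pvDigitsB (m : Int) : List Int :=
  if h : 0 < m then PySem.Int.mod m 10 :: pvDigitsB (PySem.Int.floordiv m 10) else []
termination_by m.toNat
decreasing_by
  rw [PySem.Int.floordiv_eq_ediv_of_pos (by omega)]
  omega

-- one iteration of B's while-loop body
def pvStepB (n : Int) : Int :=
  let ss := PySem.List.sorted (pvDigitsB (if 0 ≤ n then n else -n)) (fun x => x) false
  let top4 := if 4 ≤ ss.length then PySem.List.slice ss (some (-4)) none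
              else List.replicate (4 - ss.length) 0 ++ ss
  let asc := top4.foldl (fun a d => a * 10 + d) 0
  let desc := top4.reverse.foldl (fun a d => a * 10 + d) 0
  desc - asc

-- while n != 6174: … ; fuel totalises the loop (same remark as for pvGoA)
def pvLoopB : Nat → Int → Int → Int
  | 0, _, count => count
  | f + 1, n, count => if n = 6174 then count else pvLoopB f (pvStepB n) (count + 1)

def KaprekarsConstant_acc_alt (num : Int) (acc : Int) : Int := pvLoopB 100 num acc

-- ===== PRECONDITION & SPEC =====
-- the four largest decimal digits of |num| (zero-padded), ascending
def pvTop4 (num : Int) : List Nat :=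
  let s := List.replicate 4 0 ++ PySem.List.sorted (Nat.digits 10 num.natAbs) (fun x => x) false
  s.drop (s.length - 4)

-- Pre_ excludes exactly the inputs on which Python A raises: num ≤ -1 with at most three digits
-- (the '-' sign survives the [-4:] slice, so int() raises ValueError), and num whose four largest
-- digits are all equal, where the routine reaches 0, loops on 0 and A hits RecursionError.
def Pre_KaprekarsConstant_acc (num : Int) (acc : Int) : Prop :=
  num = 6174 ∨ ((0 ≤ num ∨ 4 ≤ (Nat.digits 10 num.natAbs).length) ∧
    pvTop4 num ≠ List.replicate 4 ((pvTop4 num).headD 0))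
instance (num : Int) (acc : Int) : Decidable (Pre_KaprekarsConstant_acc num acc) := by
  unfold Pre_KaprekarsConstant_acc; infer_instance

def pvWitness_KaprekarsConstant_acc : Int × Int := (1234, 0)

def Spec_KaprekarsConstant_acc (num : Int) (acc : Int) (out : Int) : Prop := out = KaprekarsConstant_acc_alt num acc
instance (num : Int) (acc : Int) (out : Int) : Decidable (Spec_KaprekarsConstant_acc num acc out) := by unfold Spec_KaprekarsConstant_acc; infer_instance

-- ===== CLAIM (what is proved, stated in full; the proofs are below) =====
def Claim_equal_KaprekarsConstant_acc : Prop := ∀ (num : Int) (acc : Int), Dom_KaprekarsConstant_acc num acc → Pre_KaprekarsConstant_acc num acc → Spec_KaprekarsConstant_acc num acc (KaprekarsConstant_acc num acc)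

-- ===== LEMMAS AND PROOFS =====

-- B's digit loop computes Nat.digits
lemma pvDigitsB_eq (m : Int) (hm : 0 ≤ m) :
    pvDigitsB m = (Nat.digits 10 m.toNat).map (fun d : Nat => (d : Int)) := by
  by_cases h : 0 < m
  · rw [pvDigitsB, dif_pos h]
    have hcast : m = ((m.toNat : Nat) : Int) := by omega
    have hdig : Nat.digits 10 m.toNat = m.toNat % 10 :: Nat.digits 10 (m.toNat / 10) :=
      Nat.digits_def' (by norm_num) (by omega)
    have h1 : PySem.Int.mod m 10 = ((m.toNat % 10 : Nat) : Int) := by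
      rw [hcast]; exact_mod_cast PySem.Int.mod_natCast m.toNat 10
    have h2 : PySem.Int.floordiv m 10 = ((m.toNat / 10 : Nat) : Int) := by
      rw [hcast]; exact_mod_cast PySem.Int.floordiv_natCast m.toNat 10
    have hrec := pvDigitsB_eq (PySem.Int.floordiv m 10) (by rw [h2]; positivity)
    rw [h2] at hrec
    simp only [Int.toNat_natCast] at hrec
    rw [h1, h2, hrec, hdig]
    simp
  · have : m = 0 := by omega
    subst this
    rw [pvDigitsB]
    simp
termination_by m.toNat
decreasing_by
  rw [PySem.Int.floordiv_eq_ediv_of_pos (by omega)]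
  omega

-- Nat.toDigitsCore is the reversed digitChar image of Nat.digits
lemma toDigitsCore_eq (n : Nat) (hn : 0 < n) : ∀ (f : Nat) (l : List Char), n < 10 ^ f →
    Nat.toDigitsCore 10 f n l = ((Nat.digits 10 n).map Nat.digitChar).reverse ++ l := by
  induction n using Nat.strong_induction_on with
  | _ n ih =>
  intro f l hf
  match f with
  | 0 => omega
  | f + 1 =>
    have hdig : Nat.digits 10 n = n % 10 :: Nat.digits 10 (n / 10) :=
      Nat.digits_def' (by norm_num) hn
    rw [Nat.toDigitsCore]
    by_cases h : n / 10 = 0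
    · simp only [h, if_pos]
      have : Nat.digits 10 (n / 10) = [] := by rw [h]; rfl
      rw [hdig, this]
      simp
    · simp only [h, if_false]
      have hlt : n / 10 < n := Nat.div_lt_self hn (by norm_num)
      have hbound : n / 10 < 10 ^ f := by
        apply (Nat.div_lt_iff_lt_mul (by norm_num : 0 < 10)).mpr
        calc n < 10 ^ (f+1) := hf
          _ = 10 ^ f * 10 := by ring
      rw [ih (n / 10) hlt (Nat.pos_of_ne_zero h) f _ hbound, hdig]
      simp

lemma toDigits_eq (n : Nat) (hn : 0 < n) :
    Nat.toDigits 10 n = ((Nat.digits 10 n).map Nat.digitChar).reverse := by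
  rw [Nat.toDigits]
  have hb : n < 10 ^ (n + 1) := by
    calc n < 2 ^ n := Nat.lt_two_pow_self
      _ ≤ 10 ^ n := Nat.pow_le_pow_left (by norm_num) _
      _ ≤ 10 ^ (n + 1) := Nat.pow_le_pow_right (by norm_num) (by omega)
  rw [toDigitsCore_eq n hn (n + 1) [] hb]
  simp

lemma toChars_eq (n : Int) (h0 : 0 ≤ n) (h1 : 0 < n.toNat) :
    PySem.Int.toChars n = ((Nat.digits 10 n.toNat).map Nat.digitChar).reverse := by
  have hneg : ¬ n < 0 := by omega
  rw [PySem.Int.toChars, if_neg hneg]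
  exact toDigits_eq n.toNat h1

lemma toChars_neg_eq (n : Int) (h0 : n < 0) :
    PySem.Int.toChars n = '-' :: ((Nat.digits 10 n.natAbs).map Nat.digitChar).reverse := by
  rw [PySem.Int.toChars, if_pos h0]
  rw [toDigits_eq n.natAbs (by omega)]

-- sorting commutes with a monotone-on-members map
lemma sorted_map_of_mono {γ : Type} [LinearOrder γ] (xs : List Nat) (f : Nat → γ)
    (h : ∀ a ∈ xs, ∀ b ∈ xs, a ≤ b → f a ≤ f b) :
    PySem.List.sorted (xs.map f) (fun x => x) false
      = (PySem.List.sorted xs (fun x => x) false).map f := by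
  apply PySem.List.sorted_id_eq_of_perm_of_pairwise
  · exact (PySem.List.sorted_perm xs (fun x => x) false).map f
  · have hp : (PySem.List.sorted xs (fun x => x) false).Pairwise (fun a b => a ≤ b) :=
      PySem.List.sorted_pairwise xs (fun x => x)
    rw [List.pairwise_map]
    refine List.Pairwise.imp_of_mem ?_ hp
    intro a b ha hb hab
    exact h a ((PySem.List.mem_sorted _ _ _ _).mp ha) b ((PySem.List.mem_sorted _ _ _ _).mp hb) hab

lemma digitChar_mono : ∀ a b : Fin 10, a ≤ b → Nat.digitChar a.val ≤ Nat.digitChar b.val := by decide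

lemma minus_le_digitChar : ∀ a : Fin 10, '-' ≤ Nat.digitChar a.val := by decide

-- value of a four-digit-character numeral (finite check over the 10^4 digit quadruples)
set_option maxHeartbeats 4000000 in
lemma ofChars?_four : ∀ a b c d : Fin 10,
    PySem.Int.ofChars? [Nat.digitChar a.val, Nat.digitChar b.val, Nat.digitChar c.val, Nat.digitChar d.val]
      = some (((((a.val * 10 + b.val) * 10 + c.val) * 10 + d.val : Nat) : Int)) := by decide

-- the sorted digit characters of a nonnegative number
lemma sorted_chars_eq (n : Int) (h0 : 0 ≤ n) (h1 : 0 < n.toNat) :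
    PySem.List.sorted (PySem.Int.toChars n) (fun c => c) false
      = (PySem.List.sorted (Nat.digits 10 n.toNat) (fun x => x) false).map Nat.digitChar := by
  rw [toChars_eq n h0 h1]
  rw [PySem.List.sorted_eq_sorted_of_perm _ ((Nat.digits 10 n.toNat).map Nat.digitChar)
    (fun x => x) (fun a b h => h) (List.reverse_perm _)]
  apply sorted_map_of_mono
  intro a ha b hb hab
  exact digitChar_mono ⟨a, Nat.digits_lt_base (by norm_num) ha⟩
    ⟨b, Nat.digits_lt_base (by norm_num) hb⟩ hab

-- the sorted characters of a negative number: the '-' sign sorts to the front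
lemma sorted_chars_neg_eq (n : Int) (h0 : n < 0) :
    PySem.List.sorted (PySem.Int.toChars n) (fun c => c) false
      = '-' :: (PySem.List.sorted (Nat.digits 10 n.natAbs) (fun x => x) false).map Nat.digitChar := by
  rw [toChars_neg_eq n h0]
  apply PySem.List.sorted_id_eq_of_perm_of_pairwise
  · refine List.Perm.cons '-' ?_
    exact ((PySem.List.sorted_perm _ (fun x => x) false).map Nat.digitChar).trans
      (List.reverse_perm _).symm
  · rw [List.pairwise_cons]
    constructor
    · intro c hc
      rw [List.mem_map] at hc
      obtain ⟨d, hd, rfl⟩ := hc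
      exact minus_le_digitChar ⟨d, Nat.digits_lt_base (by norm_num)
        ((PySem.List.mem_sorted _ _ _ _).mp hd)⟩
    · have hp : (PySem.List.sorted (Nat.digits 10 n.natAbs) (fun x => x) false).Pairwise
          (fun a b => a ≤ b) := PySem.List.sorted_pairwise _ (fun x => x)
      rw [List.pairwise_map]
      refine List.Pairwise.imp_of_mem ?_ hp
      intro a b ha hb hab
      exact digitChar_mono
        ⟨a, Nat.digits_lt_base (by norm_num) ((PySem.List.mem_sorted _ _ _ _).mp ha)⟩
        ⟨b, Nat.digits_lt_base (by norm_num) ((PySem.List.mem_sorted _ _ _ _).mp hb)⟩ hab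

-- the four largest digits of |n|, ascending, zero-padded (proof-only abbreviation)
def pvT (n : Int) : List Nat :=
  let t := PySem.List.sorted (Nat.digits 10 n.natAbs) (fun x => x) false
  List.replicate (4 - t.length) 0 ++ t.drop (t.length - 4)

lemma pvT_len (n : Int) : (pvT n).length = 4 := by
  simp [pvT]
  omega

lemma pvT_lt10 (n : Int) : ∀ x ∈ pvT n, x < 10 := by
  intro x hx
  rw [pvT] at hx
  simp at hx
  rcases hx with h | h
  · omega
  · exact Nat.digits_lt_base (by norm_num)
      ((PySem.List.mem_sorted _ _ _ _).mp (List.mem_of_mem_drop h))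

lemma pvT_sorted (n : Int) : (pvT n).Pairwise (· ≤ ·) := by
  rw [pvT]
  apply List.pairwise_append.mpr
  refine ⟨List.pairwise_replicate.mpr (by simp), ?_, ?_⟩
  · exact (PySem.List.sorted_pairwise _ _).drop
  · intro a ha b hb
    have : a = 0 := List.eq_of_mem_replicate ha
    omega

-- A's chiffres list is the digitChar image of pvT: nonnegative case
lemma chiffresA_eq (n : Int) (h0 : 0 ≤ n) (h1 : 0 < n.toNat) :
    PySem.List.slice
      ((PySem.List.pyRange 0 4 1).map (fun _ => '0') ++
        PySem.List.sorted (PySem.Int.toChars n) (fun c => c) false) (some (-4)) none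
      = (pvT n).map Nat.digitChar := by
  have hpad : (PySem.List.pyRange 0 4 1).map (fun _ => '0') = List.replicate 4 '0' := by decide
  have habs : n.toNat = n.natAbs := by omega
  rw [hpad, sorted_chars_eq n h0 h1, habs]
  set t := PySem.List.sorted (Nat.digits 10 n.natAbs) (fun x => x) false with ht
  rw [PySem.List.slice_from_neg_ofNat _ 4 (by norm_num)]
  rw [pvT, ← ht]
  simp only [List.length_append, List.length_replicate, List.length_map]
  by_cases h : t.length ≤ 4
  · rw [List.drop_append_of_le_length (by simp; omega)]
    have h4 : 4 + t.length - 4 = t.length := by omega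
    rw [h4, List.drop_replicate]
    rw [List.map_append, List.map_replicate, List.map_drop]
    have : t.length - 4 = 0 := by omega
    simp [this]
    right; rfl
  · have h4 : 4 + t.length - 4 = 4 + (t.length - 4) := by omega
    have : (4 : Nat) = (List.replicate 4 '0').length := by simp
    rw [h4, this, List.drop_append]
    rw [List.map_append, List.map_replicate, List.map_drop]
    have : 4 - t.length = 0 := by omega
    simp [this]

-- A's chiffres list: negative case with at least four digits (the '-' is sliced away)
lemma chiffresA_neg_eq (n : Int) (h0 : n < 0)
    (h4 : 4 ≤ (Nat.digits 10 n.natAbs).length) :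
    PySem.List.slice
      ((PySem.List.pyRange 0 4 1).map (fun _ => '0') ++
        PySem.List.sorted (PySem.Int.toChars n) (fun c => c) false) (some (-4)) none
      = (pvT n).map Nat.digitChar := by
  have hpad : (PySem.List.pyRange 0 4 1).map (fun _ => '0') = List.replicate 4 '0' := by decide
  rw [hpad, sorted_chars_neg_eq n h0]
  set t := PySem.List.sorted (Nat.digits 10 n.natAbs) (fun x => x) false with ht
  have hlen : 4 ≤ t.length := by
    rw [ht, PySem.List.length_sorted]; exact h4
  rw [PySem.List.slice_from_neg_ofNat _ 4 (by norm_num)]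
  rw [pvT, ← ht]
  have hre : List.replicate 4 '0' ++ '-' :: t.map Nat.digitChar
      = (List.replicate 4 '0' ++ ['-']) ++ t.map Nat.digitChar := by simp
  rw [hre]
  simp only [List.length_append, List.length_replicate, List.length_map,
    List.length_cons, List.length_nil]
  have h5 : 4 + (0 + 1) + t.length - 4 = (List.replicate 4 '0' ++ ['-']).length + (t.length - 4) := by
    simp; omega
  rw [h5, List.drop_append]
  rw [List.map_append, List.map_replicate, List.map_drop]
  have : 4 - t.length = 0 := by omega
  simp [this]

-- B's top4 list is the Int image of pvT
lemma top4B_eq (n : Int) :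
    (let ss := PySem.List.sorted (pvDigitsB (if 0 ≤ n then n else -n)) (fun x => x) false
     if 4 ≤ ss.length then PySem.List.slice ss (some (-4)) none
     else List.replicate (4 - ss.length) 0 ++ ss)
      = (pvT n).map (fun d : Nat => (d : Int)) := by
  have hm0 : (0:Int) ≤ (if 0 ≤ n then n else -n) := by split <;> omega
  have hmabs : (if 0 ≤ n then n else -n).toNat = n.natAbs := by split <;> omega
  have hss : PySem.List.sorted (pvDigitsB (if 0 ≤ n then n else -n)) (fun x => x) false
      = (PySem.List.sorted (Nat.digits 10 n.natAbs) (fun x => x) false).map (fun d : Nat => (d : Int)) := by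
    rw [pvDigitsB_eq _ hm0, hmabs]
    exact sorted_map_of_mono (Nat.digits 10 n.natAbs) (fun d : Nat => (d : Int))
      (fun a _ b _ h => by simpa using h)
  set t := PySem.List.sorted (Nat.digits 10 n.natAbs) (fun x => x) false with ht
  simp only [hss]
  rw [pvT, ← ht]
  simp only [List.length_map]
  by_cases h : 4 ≤ t.length
  · rw [if_pos h]
    rw [PySem.List.slice_from_neg_ofNat _ 4 (by norm_num)]
    rw [List.map_append, List.map_replicate, List.map_drop]
    have : 4 - t.length = 0 := by omega
    simp [this]
  · rw [if_neg h]
    rw [List.map_append, List.map_replicate, List.map_drop]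
    have : t.length - 4 = 0 := by omega
    simp [this]

-- the two step functions agree given the chiffres characterisation
lemma step_eq_of_chiffres (n : Int)
    (hA : PySem.List.slice
      ((PySem.List.pyRange 0 4 1).map (fun _ => '0') ++
        PySem.List.sorted (PySem.Int.toChars n) (fun c => c) false) (some (-4)) none
      = (pvT n).map Nat.digitChar) : pvStepA n = pvStepB n := by
  obtain ⟨a, b, c, d, habcd⟩ : ∃ a b c d : Nat, pvT n = [a, b, c, d] := by
    have := pvT_len n
    rcases h : pvT n with _ | ⟨a, _ | ⟨b, _ | ⟨c, _ | ⟨d, _ | ⟨e, l⟩⟩⟩⟩⟩ <;>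
      simp [h] at this ⊢
  have hlt : ∀ x ∈ pvT n, x < 10 := pvT_lt10 n
  rw [habcd] at hlt
  have ha : a < 10 := hlt a (by simp)
  have hb : b < 10 := hlt b (by simp)
  have hc : c < 10 := hlt c (by simp)
  have hd : d < 10 := hlt d (by simp)
  rw [pvStepA, pvStepB]
  rw [hA, top4B_eq n, habcd]
  simp only [List.map_cons, List.map_nil, List.reverse_cons, List.reverse_nil,
    List.nil_append, List.cons_append, List.foldl_cons, List.foldl_nil]
  rw [ofChars?_four ⟨a, ha⟩ ⟨b, hb⟩ ⟨c, hc⟩ ⟨d, hd⟩]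
  rw [show [Nat.digitChar d, Nat.digitChar c, Nat.digitChar b, Nat.digitChar a]
      = [Nat.digitChar (⟨d, hd⟩ : Fin 10).val, Nat.digitChar (⟨c, hc⟩ : Fin 10).val,
         Nat.digitChar (⟨b, hb⟩ : Fin 10).val, Nat.digitChar (⟨a, ha⟩ : Fin 10).val] from rfl]
  rw [ofChars?_four ⟨d, hd⟩ ⟨c, hc⟩ ⟨b, hb⟩ ⟨a, ha⟩]
  simp only [Option.getD_some]
  push_cast
  ring

lemma step_eq (n : Int) (hn : 0 ≤ n) : pvStepA n = pvStepB n := by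
  by_cases h1 : 0 < n.toNat
  case neg =>
    have : n = 0 := by omega
    subst this
    have hz : pvDigitsB (if (0:Int) ≤ 0 then 0 else -0) = [] := by rw [pvDigitsB]; norm_num
    simp only [pvStepA, pvStepB, hz]
    decide
  case pos =>
    exact step_eq_of_chiffres n (chiffresA_eq n hn h1)

lemma step_eq_neg (n : Int) (hn : n < 0) (h4 : 4 ≤ (Nat.digits 10 n.natAbs).length) :
    pvStepA n = pvStepB n :=
  step_eq_of_chiffres n (chiffresA_neg_eq n hn h4)

-- B's step never produces a negative number
lemma stepB_nonneg (n : Int) : 0 ≤ pvStepB n := by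
  obtain ⟨a, b, c, d, habcd⟩ : ∃ a b c d : Nat, pvT n = [a, b, c, d] := by
    have := pvT_len n
    rcases h : pvT n with _ | ⟨a, _ | ⟨b, _ | ⟨c, _ | ⟨d, _ | ⟨e, l⟩⟩⟩⟩⟩ <;>
      simp [h] at this ⊢
  have hsorted := pvT_sorted n
  rw [habcd] at hsorted
  have hab : a ≤ b := by simp [List.pairwise_cons] at hsorted; omega
  have hbc : b ≤ c := by simp [List.pairwise_cons] at hsorted; omega
  have hcd : c ≤ d := by simp [List.pairwise_cons] at hsorted; omega
  rw [pvStepB]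
  rw [top4B_eq n, habcd]
  simp only [List.map_cons, List.map_nil, List.reverse_cons, List.reverse_nil,
    List.nil_append, List.cons_append, List.foldl_cons, List.foldl_nil]
  push_cast
  nlinarith [hab, hbc, hcd]

lemma loop_eq : ∀ (f : Nat) (num acc : Int), 0 ≤ num → pvGoA f num acc = pvLoopB f num acc := by
  intro f
  induction f with
  | zero => intro num acc _; rfl
  | succ f ih =>
    intro num acc hnum
    show (if num = 6174 then acc else pvGoA f (pvStepA num) (acc + 1))
       = (if num = 6174 then acc else pvLoopB f (pvStepB num) (acc + 1))
    by_cases h : num = 6174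
    · simp [h]
    · simp only [h, if_false]
      rw [step_eq num hnum]
      exact ih (pvStepB num) (acc + 1) (stepB_nonneg num)

-- ===== VERDICT (by name: the statement is the Claim_ definition above) =====
theorem KaprekarsConstant_acc_spec : Claim_equal_KaprekarsConstant_acc := by
  intro num acc _ hpre
  show KaprekarsConstant_acc num acc = KaprekarsConstant_acc_alt num acc
  by_cases hnn : 0 ≤ num
  · exact loop_eq 100 num acc hnn
  · have h4 : 4 ≤ (Nat.digits 10 num.natAbs).length := by
      rcases hpre with h | ⟨h | h, _⟩
      · omega
      · omega
      · exact h
    have hne : num ≠ 6174 := by omega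
    show pvGoA 100 num acc = pvLoopB 100 num acc
    rw [show (100 : Nat) = 99 + 1 from rfl, pvGoA, pvLoopB]
    simp only [hne, if_false]
    rw [step_eq_neg num (by omega) h4]
    exact loop_eq 99 (pvStepB num) (acc + 1) (stepB_nonneg num)
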